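-- pv_equiv track=rewrite | github.com/kellaviietee/Python-projects | KT/kt2/exam.py | switch_lasts_and_firsts
-- ===== SOURCE A (Python) =====
-- def switch_lasts_and_firsts(s: str) -> str:
--     """
--     Move last two characters to the beginning of string and first two characters to the end of string.
--
--     When string length is smaller than 4, return reversed string.
--
--     switch_lasts_and_firsts("ambulance") => "cebulanam"
--     switch_lasts_and_firsts("firetruck") => "ckretrufi"
--     switch_lasts_and_firsts("car") => "rac"
--
--     :param s:
--     :return: modified string
--     """
--     if len(s) < 4:
--         new_word = list(s)
--         new_word.reverse()
--         new_reversed = ""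
--         for letter in new_word:
--             new_reversed += letter
--         return new_reversed
--     else:
--         word = list(s)
--         last_letter = word.pop(-1)
--         word.insert(0, last_letter)
--         last_letter = word.pop(-1)
--         word.insert(0, last_letter)
--         first_letter = word.pop(2)
--         word.append(first_letter)
--         first_letter = word.pop(2)
--         word.append(first_letter)
--         new_word = ""
--         for letter in word:
--             new_word += letter
--         return new_word
-- ===== SOURCE B (Python) =====
-- def switch_lasts_and_firsts(s: str) -> str:
--     """Same task via direct slicing: reversed string if short, else three-slice concatenation."""
--     if len(s) < 4:
--         return s[::-1]
--     return s[-2:] + s[2:-2] + s[:2]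
-- ===== Notes on version B (the rewrite author's own statement) =====
-- stated objective: simpler
-- what changed: Replaced the list pop/insert mutation sequence and the character-by-character string accumulation loop with a closed-form concatenation of three slices (s[-2:]+s[2:-2]+s[:2]), and s[::-1] for the short case.
import Mathlib
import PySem

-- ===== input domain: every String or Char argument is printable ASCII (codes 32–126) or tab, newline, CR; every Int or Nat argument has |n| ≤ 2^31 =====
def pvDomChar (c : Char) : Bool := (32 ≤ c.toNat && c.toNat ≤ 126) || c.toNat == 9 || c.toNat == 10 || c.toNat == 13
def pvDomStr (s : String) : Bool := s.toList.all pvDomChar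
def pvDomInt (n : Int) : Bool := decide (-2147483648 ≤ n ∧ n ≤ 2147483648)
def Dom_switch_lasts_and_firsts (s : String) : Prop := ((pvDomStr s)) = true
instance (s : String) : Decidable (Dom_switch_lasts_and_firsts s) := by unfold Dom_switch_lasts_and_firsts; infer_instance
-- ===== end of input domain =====

-- B replaces A's list pop/insert mutations and accumulator loop with a closed-form
-- three-slice concatenation (objective: simpler).

-- ===== PORT A =====
-- literal port of A: list(s), pop/insert/append mutations, then a foldl rebuilding the string
def switch_lasts_and_firsts (s : String) : String :=
  if PySem.Str.len s < 4 then
    let new_word := s.toList.reverse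
    String.mk (new_word.foldl (fun acc letter => acc ++ [letter]) [])
  else
    let word := s.toList
    match PySem.List.pop? word (-1) with
    | none => ""  -- unreachable: len s ≥ 4
    | some (last_letter, word) =>
      let word := PySem.List.insert word 0 last_letter
      match PySem.List.pop? word (-1) with
      | none => ""  -- unreachable
      | some (last_letter, word) =>
        let word := PySem.List.insert word 0 last_letter
        match PySem.List.pop? word 2 with
        | none => ""  -- unreachable
        | some (first_letter, word) =>
          let word := word ++ [first_letter]
          match PySem.List.pop? word 2 with
          | none => ""  -- unreachable
          | some (first_letter, word) =>
            let word := word ++ [first_letter]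
            String.mk (word.foldl (fun acc letter => acc ++ [letter]) [])

-- ===== PORT B =====
def switch_lasts_and_firsts_alt (s : String) : String :=
  if PySem.Str.len s < 4 then
    String.mk s.toList.reverse
  else
    String.mk (PySem.List.slice s.toList (some (-2)) none
      ++ PySem.List.slice s.toList (some 2) (some (-2))
      ++ PySem.List.slice s.toList none (some 2))

-- ===== PRECONDITION & SPEC =====
def Spec_switch_lasts_and_firsts (s : String) (out : String) : Prop := out = switch_lasts_and_firsts_alt s
instance (s : String) (out : String) : Decidable (Spec_switch_lasts_and_firsts s out) := by unfold Spec_switch_lasts_and_firsts; infer_instance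

-- ===== CLAIM (what is proved, stated in full; the proofs are below) =====
def Claim_equal_switch_lasts_and_firsts : Prop := ∀ (s : String), Dom_switch_lasts_and_firsts s → Spec_switch_lasts_and_firsts s (switch_lasts_and_firsts s)

-- ===== LEMMAS AND PROOFS =====

-- the accumulator loop `for letter in word: acc += letter` rebuilds the list
theorem foldl_append_singleton {α : Type} (l acc : List α) :
    l.foldl (fun a x => a ++ [x]) acc = acc ++ l := by
  induction l generalizing acc with
  | nil => simp
  | cons x t ih => simp [List.foldl, ih]

-- any list of length ≥ 4 splits as a :: b :: (m ++ [u, v])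
theorem decomp4 {α : Type} (l : List α) (h : 4 ≤ l.length) :
    ∃ a b m u v, l = a :: b :: (m ++ [u, v]) := by
  match l with
  | a :: b :: t =>
    have ht : 2 ≤ t.length := by simpa using h
    match ht' : t.reverse with
    | [] =>
      have : t = [] := by simpa using congrArg List.reverse ht'
      subst this; simp at ht
    | [x] =>
      have : t = [x] := by simpa using congrArg List.reverse ht'
      subst this; simp at ht
    | v :: u :: m' =>
      have : t = (m'.reverse ++ [u, v]) := by
        have := congrArg List.reverse ht'
        simpa using this
      exact ⟨a, b, m'.reverse, u, v, by rw [this]⟩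

theorem switch_spec_aux (s : String) :
    switch_lasts_and_firsts s = switch_lasts_and_firsts_alt s := by
  unfold switch_lasts_and_firsts switch_lasts_and_firsts_alt
  by_cases h : PySem.Str.len s < 4
  · rw [if_pos h, if_pos h]
    simp only [foldl_append_singleton, List.nil_append]
  · rw [if_neg h, if_neg h]
    have hlen : 4 ≤ s.toList.length := by
      have := PySem.Str.len_eq s
      omega
    obtain ⟨a, b, m, u, v, hd⟩ := decomp4 s.toList hlen
    rw [hd]
    -- A side: evaluate the four pops step by step
    have p1 : PySem.List.pop? (a :: b :: (m ++ [u, v]))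
        = some (v, a :: b :: (m ++ [u])) := by
      have e : a :: b :: (m ++ [u, v]) = (a :: b :: (m ++ [u])) ++ [v] := by simp
      rw [e, PySem.List.pop?_last]

    have p2 : PySem.List.pop? (v :: a :: b :: (m ++ [u]))
        = some (u, v :: a :: b :: m) := by
      have e : v :: a :: b :: (m ++ [u]) = (v :: a :: b :: m) ++ [u] := by simp
      rw [e, PySem.List.pop?_last]

    have c2 : (2 : Int) = ((2 : Nat) : Int) := by norm_num
    have p3 : PySem.List.pop? (u :: v :: a :: b :: m) 2
        = some (a, u :: v :: b :: m) := by
      rw [c2, PySem.List.pop?_natCast _ 2 (by simp)]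
      simp

    have p4 : PySem.List.pop? (u :: v :: b :: m ++ [a]) 2
        = some (b, u :: v :: (m ++ [a])) := by
      rw [c2, PySem.List.pop?_natCast _ 2 (by simp)]
      simp

    -- B side: evaluate the three slices
    have s1 : PySem.List.slice (a :: b :: (m ++ [u, v])) (some (-2)) none = [u, v] := by
      rw [PySem.List.slice_from_neg_ofNat _ 2 (by omega)]
      simp
    have s2 : PySem.List.slice (a :: b :: (m ++ [u, v])) (some 2) (some (-2)) = m := by
      simp [PySem.List.slice, PySem.List.clampIdx]
      rw [if_neg (by omega)]
      have h2 : ((m.length : Int) + 2 + 1 + 1 + -2).toNat - 2 = m.length := by omega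
      rw [h2]
      simp
    have s3 : PySem.List.slice (a :: b :: (m ++ [u, v])) none (some 2) = [a, b] := by
      rw [PySem.List.slice_to _ (by norm_num)]
      simp
    simp only [List.cons_append] at p4
    simp only [p1, PySem.List.insert_zero, p2, p3, List.cons_append, p4,
      s1, s2, s3, foldl_append_singleton, List.nil_append, List.append_assoc]

-- ===== VERDICT (by name: the statement is the Claim_ definition above) =====
theorem switch_lasts_and_firsts_spec : Claim_equal_switch_lasts_and_firsts := by
  intro s _
  exact switch_spec_aux s
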